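-- pv_equiv track=rewrite | github.com/LukaszMalucha/Bible-Project | htm_to_txt_parser.py | sort_strings
-- ===== SOURCE A (Python) =====
-- import operator
--
-- def sort_strings(l):
--     """Group strings by their page location in order to keep row together"""
--     sorted_strings = {}
--     for string in l:
--         if string[0] not in sorted_strings:
--             sorted_strings[string[0]] = []
--         sorted_strings[string[0]].append(string[1])
--
--
--     sorted_values = sorted(sorted_strings.items(), key=operator.itemgetter(0))
--
--     sorts = []
--     for element in sorted_values:
--         sorts.append(list(reversed(element[1])))
--
--
--     # SIGNAL POSSIBLE TABLE ROW
--     sorted_string_list = []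
--     for element in sorts:
--         " ".join(element)
--         row_string = element[0]
--         row_string = row_string.replace("\n", " ")
--         sorted_string_list.append(row_string)
--
--     return sorted_string_list
-- ===== SOURCE B (Python) =====
-- def sort_strings(l):
--     """Group strings by their page location in order to keep row together"""
--     last = {}
--     for string in l:
--         last[string[0]] = string[1]
--     return [last[k].replace("\n", " ") for k in sorted(last)]
-- ===== Notes on version B (the rewrite author's own statement) =====
-- stated objective: simpler
-- what changed: B keeps a single scalar per key (plain dict overwrite, last write wins) instead of accumulating a per-key list, reversing it and taking its head; it then maps replace over the sorted keys in one comprehension, dropping A's dead ' '.join pass.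
import Mathlib
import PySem

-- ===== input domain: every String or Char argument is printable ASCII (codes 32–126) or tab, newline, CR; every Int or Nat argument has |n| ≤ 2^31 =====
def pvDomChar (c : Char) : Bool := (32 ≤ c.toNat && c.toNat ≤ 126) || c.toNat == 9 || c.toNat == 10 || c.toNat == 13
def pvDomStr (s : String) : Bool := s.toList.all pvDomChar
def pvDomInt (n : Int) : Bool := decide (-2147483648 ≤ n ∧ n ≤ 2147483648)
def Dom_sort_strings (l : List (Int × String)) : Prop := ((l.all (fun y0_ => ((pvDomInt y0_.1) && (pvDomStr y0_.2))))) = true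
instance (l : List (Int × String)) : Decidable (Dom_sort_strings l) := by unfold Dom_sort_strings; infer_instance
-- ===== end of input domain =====

-- B replaces A's per-key accumulated lists (reversed, head taken) by a last-write-wins dict and a single map over sorted keys; simpler, same results.

-- ===== PORT A =====
-- group into lists, sort items by key, reverse each list, take element[0], replace "\n" by " "
-- (the dead `" ".join(element)` of A computes a value that is discarded; it has no effect and is not ported)
def sort_strings (l : List (Int × String)) : List String :=
  let sorted_strings : PySem.Dict Int (List String) :=
    l.foldl (fun d p => d.modify p.1 [] (fun xs => xs ++ [p.2])) PySem.Dict.empty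
  let sorted_values := PySem.List.sorted sorted_strings.items (fun p => p.1) false
  let sorts := sorted_values.foldl (fun acc e => acc ++ [e.2.reverse]) []
  -- element[0] : the grouped list is never empty, so the total form with default "" is exact
  sorts.foldl (fun acc e => acc ++ [PySem.Str.replace (PySem.List.pyGetD e 0 "") "\n" " "]) []

-- ===== PORT B =====
def sort_strings_alt (l : List (Int × String)) : List String :=
  let last : PySem.Dict Int String := l.foldl (fun d p => d.insert p.1 p.2) PySem.Dict.empty
  (PySem.List.sorted last.keys (fun k => k) false).map
    (fun k => PySem.Str.replace (last.getD k "") "\n" " ")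

-- ===== PRECONDITION & SPEC =====
def Spec_sort_strings (l : List (Int × String)) (out : List String) : Prop := out = sort_strings_alt l
instance (l : List (Int × String)) (out : List String) : Decidable (Spec_sort_strings l out) := by unfold Spec_sort_strings; infer_instance

-- ===== CLAIM (what is proved, stated in full; the proofs are below) =====
def Claim_equal_sort_strings : Prop := ∀ (l : List (Int × String)), Dom_sort_strings l → Spec_sort_strings l (sort_strings l)

-- ===== LEMMAS AND PROOFS =====

-- last-write-wins loop: lookup is the LAST value filtered at that key
theorem getD_foldl_insert_last (l : List (Int × String)) (d : PySem.Dict Int String) (c : Int) (dflt : String) :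
    (l.foldl (fun d p => d.insert p.1 p.2) d).getD c dflt
      = ((l.filter (fun p => p.1 == c)).map (·.2)).getLastD (d.getD c dflt) := by
  induction l generalizing d with
  | nil => rfl
  | cons p l ih =>
    simp only [List.foldl_cons, List.filter_cons]
    by_cases h : p.1 = c
    · subst h
      rw [if_pos (by simp), ih, PySem.Dict.getD_insert, if_pos rfl, List.map_cons, List.getLastD_cons]
    · have hb : (p.1 == c) = false := by simp [h]
      rw [if_neg (by simp [hb]), ih, PySem.Dict.getD_insert, if_neg (Ne.symm h)]

-- nonempty group list: its reversed head (default-"") is its last element with any default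
theorem reverse_getD_zero_eq_getLastD {α : Type} (xs : List α) (d d' : α) (h : xs ≠ []) :
    (PySem.List.pyGetD xs.reverse 0 d) = xs.getLastD d' := by
  rw [PySem.List.pyGetD_zero, List.getD_eq_getElem?_getD, ← List.head?_eq_getElem?,
    List.head?_reverse, List.getLastD_eq_getLast?]
  cases hl : xs.getLast? with
  | none => exact absurd (List.getLast?_eq_none_iff.mp hl) h
  | some a => rfl

theorem sort_strings_main (l : List (Int × String)) : sort_strings l = sort_strings_alt l := by
  simp only [sort_strings, sort_strings_alt]
  set dA := l.foldl (fun d p => d.modify p.1 [] (fun xs => xs ++ [p.2])) PySem.Dict.empty with hdA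
  set dB := l.foldl (fun d p => d.insert p.1 p.2) PySem.Dict.empty with hdB
  -- both dicts list the same keys: first occurrences of l.map fst
  have hkA : dA.keys = PySem.Set.ofList (l.map (fun p => p.1)) := by
    rw [hdA, PySem.Dict.keys_foldl_modify_key]; rfl
  have hkB : dB.keys = PySem.Set.ofList (l.map (fun p => p.1)) := by
    rw [hdB, PySem.Dict.keys_foldl_insert_key]; rfl
  have hndA : dA.keys.Nodup := by rw [hkA]; exact PySem.Set.nodup_ofList _
  -- collapse A's two append loops into maps
  rw [PySem.List.foldl_append_singleton_eq_map, PySem.List.foldl_append_singleton_eq_map]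
  simp only [List.nil_append]
  rw [List.map_map]
  -- A's items are its keys paired with their grouped lists
  rw [PySem.Dict.items_eq_map_keys dA hndA []]
  -- sorting key-tagged pairs by fst = mapping over the sorted keys
  have hsorted : PySem.List.sorted (dA.keys.map (fun k => (k, dA.getD k []))) (fun p => p.1) false
      = (PySem.List.sorted dA.keys (fun k => k) false).map (fun k => (k, dA.getD k [])) := by
    apply PySem.List.sorted_eq_of_perm_of_pairwise_lt
    · exact (PySem.List.sorted_perm dA.keys (fun k => k) false).map _
    · rw [List.pairwise_map]
      have h1 : (PySem.List.sorted dA.keys (fun k => k) false).Pairwise (· ≤ ·) :=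
        PySem.List.sorted_pairwise dA.keys (fun k => k)
      have h2 : (PySem.List.sorted dA.keys (fun k => k) false).Nodup :=
        ((PySem.List.sorted_perm dA.keys (fun k => k) false).nodup_iff).mpr hndA
      exact (h1.and h2).imp (fun h => lt_of_le_of_ne h.1 h.2)
  rw [hsorted, List.map_map, hkA, ← hkB]
  -- pointwise: for each key, reversed-group-head = last inserted value
  apply List.map_congr_left
  intro k hk
  have hkmem : k ∈ l.map (fun p => p.1) := by
    rw [← PySem.Set.mem_ofList, ← hkB]
    exact (PySem.List.mem_sorted _ _ _ _).mp hk
  obtain ⟨p, hp, hpk⟩ := List.mem_map.mp hkmem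
  have hgrp : dA.getD k [] = (l.filter (fun p => p.1 == k)).map (·.2) := by
    rw [hdA, PySem.Dict.getD_foldl_modify_append, PySem.Dict.getD_empty, List.nil_append]
  have hne : (l.filter (fun p => p.1 == k)).map (·.2) ≠ [] := by
    have : p ∈ l.filter (fun p => p.1 == k) := List.mem_filter.mpr ⟨hp, by simp [hpk]⟩
    exact fun h => absurd (List.map_eq_nil_iff.mp h) (List.ne_nil_of_mem this)
  have hlast : dB.getD k "" = ((l.filter (fun p => p.1 == k)).map (·.2)).getLastD "" := by
    rw [hdB, getD_foldl_insert_last, PySem.Dict.getD_empty]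
  simp only [Function.comp]
  rw [hgrp, hlast, reverse_getD_zero_eq_getLastD _ _ "" hne]

theorem sort_strings_spec : Claim_equal_sort_strings := by
  intro l _
  unfold Spec_sort_strings
  exact sort_strings_main l
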